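-- pv_equiv track=rewrite | github.com/Luke943/Algorithms | pathfinding.py | subtours
-- ===== SOURCE A (Python) =====
-- from itertools import combinations
--
-- def subtours(r, N):
--     # generate all numbers with r bits raised out of first N bits
--     combos = combinations(range(N), r)
--     subtours = []
--     for combo in combos:
--         x = 0
--         for num in combo:
--             x += 1 << num
--         subtours.append(x)
--     return subtours
-- ===== SOURCE B (Python) =====
-- def subtours(r, N):
--     # depth-first enumeration with an explicit stack, carrying the partial
--     # mask down the choice tree instead of rebuilding each mask from scratch
--     if r < 0:
--         raise ValueError("r must be non-negative")
--     res = []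
--     stack = [(0, r, 0)]
--     while stack:
--         start, rem, mask = stack.pop()
--         if rem == 0:
--             res.append(mask)
--             continue
--         for i in reversed(range(start, N - rem + 1)):
--             stack.append((i + 1, rem - 1, mask + (1 << i)))
--     return res
-- ===== Notes on version B (the rewrite author's own statement) =====
-- stated objective: alternative
-- what changed: Replaces itertools.combinations plus an inner loop that rebuilds every mask from scratch (O(r) shift-adds per combination) by an explicit-stack depth-first enumerator that carries the partial mask down the choice tree, one shift-add per tree node, and never recomputes a prefix.
import Mathlib
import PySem

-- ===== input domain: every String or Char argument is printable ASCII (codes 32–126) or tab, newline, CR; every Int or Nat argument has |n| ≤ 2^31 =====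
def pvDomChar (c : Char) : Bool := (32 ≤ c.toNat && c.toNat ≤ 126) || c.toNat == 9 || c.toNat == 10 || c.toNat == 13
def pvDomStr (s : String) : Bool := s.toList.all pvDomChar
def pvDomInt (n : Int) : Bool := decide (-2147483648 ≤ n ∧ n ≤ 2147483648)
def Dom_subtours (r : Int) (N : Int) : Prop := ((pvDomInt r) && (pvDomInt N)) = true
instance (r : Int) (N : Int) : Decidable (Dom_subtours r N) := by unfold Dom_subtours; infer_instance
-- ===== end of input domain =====

-- B replaces itertools.combinations plus a per-combination mask-rebuilding inner loop by an
-- explicit-stack depth-first enumerator that carries the partial mask down the choice tree.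

-- ===== PORT A =====
-- itertools.combinations(xs, k) in lexicographic order (hand port, exact:
-- same order and contents as CPython's combinations of a list).
def pvCombos : Nat → List Int → List (List Int)
  | 0, _ => [[]]
  | _ + 1, [] => []
  | k + 1, x :: xs => (pvCombos k xs).map (x :: ·) ++ pvCombos (k + 1) xs

-- for combo: x = 0; for num in combo: x += 1 << num   (num ≥ 0 on the admitted inputs)
def subtours (r : Int) (N : Int) : List Int :=
  (pvCombos r.toNat (PySem.List.pyRange 0 N 1)).map
    (fun combo => combo.foldl (fun x num => x + ((1 : Int) <<< num.toNat)) 0)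

-- ===== PORT B =====
-- termination measure for the stack machine: number of nodes of the choice tree below (rem, start)
def pvNodes (N : Int) : Nat → Int → Nat
  | 0, _ => 1
  | rem + 1, start =>
      1 + ((PySem.List.pyRange start (N - (↑rem + 1) + 1) 1).map (fun i => pvNodes N rem (i + 1))).sum

-- while stack: (start, rem, mask) = stack.pop(); …  — the Lean list's HEAD is Python's stack top,
-- so Python's "for i in reversed(range(start, N - rem + 1)): stack.append(…)" is prepending the
-- mapped (un-reversed) range; res.append(mask) is a cons-accumulator reversed on exit.
def pvLoop (N : Int) : List (Int × Nat × Int) → List Int → List Int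
  | [], acc => acc.reverse
  | (_, 0, mask) :: rest, acc => pvLoop N rest (mask :: acc)
  | (start, rem + 1, mask) :: rest, acc =>
      pvLoop N
        (((PySem.List.pyRange start (N - (↑rem + 1) + 1) 1).map
            (fun (i : Int) => (i + 1, rem, mask + ((1 : Int) <<< i.toNat)))) ++ rest)
        acc
  termination_by stack _ => (stack.map (fun e => pvNodes N e.2.1 e.1)).sum
  decreasing_by
  · simp [pvNodes]
  · simp [pvNodes, List.map_map, Function.comp_def]

def subtours_alt (r : Int) (N : Int) : List Int :=
  pvLoop N [(0, r.toNat, 0)] []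

-- ===== PRECONDITION & SPEC =====
-- Python A raises ValueError when r < 0 (itertools.combinations); B raises there too.
def Pre_subtours (r : Int) (N : Int) : Prop := 0 ≤ r
instance (r : Int) (N : Int) : Decidable (Pre_subtours r N) := by unfold Pre_subtours; infer_instance
def pvWitness_subtours : Int × Int := (2, 4)

def Spec_subtours (r : Int) (N : Int) (out : List Int) : Prop := out = subtours_alt r N
instance (r : Int) (N : Int) (out : List Int) : Decidable (Spec_subtours r N out) := by unfold Spec_subtours; infer_instance

-- ===== CLAIM (what is proved, stated in full; the proofs are below) =====
def Claim_equal_subtours : Prop := ∀ (r : Int) (N : Int), Dom_subtours r N → Pre_subtours r N → Spec_subtours r N (subtours r N)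

-- ===== LEMMAS AND PROOFS =====

-- recursive form of the enumeration: what one stack entry (start, k, mask) contributes
def pvGo (N : Int) : Nat → Int → Int → List Int
  | 0, _, mask => [mask]
  | rem + 1, start, mask =>
      (PySem.List.pyRange start (N - (↑rem + 1) + 1) 1).flatMap
        (fun i => pvGo N rem (i + 1) (mask + ((1 : Int) <<< i.toNat)))

lemma pvGo_succ (N : Int) (k : Nat) (start mask : Int) :
    pvGo N (k + 1) start mask
    = (PySem.List.pyRange start (N - (↑k + 1) + 1) 1).flatMap
        (fun i => pvGo N k (i + 1) (mask + ((1 : Int) <<< i.toNat))) := rfl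

-- choosing k elements from a list shorter than k yields nothing
lemma pvCombos_nil_of_short : ∀ (xs : List Int) (k : Nat), xs.length < k → pvCombos k xs = [] := by
  intro xs
  induction xs with
  | nil =>
    intro k h
    cases k with
    | zero => omega
    | succ k => rfl
  | cons x xs ih =>
    intro k h
    cases k with
    | zero => simp at h
    | succ k =>
      simp only [List.length_cons] at h
      simp only [pvCombos, ih k (by omega), ih (k + 1) (by omega), List.map_nil, List.append_nil]

-- step case of the bridge, by induction on a bound for (N - start).toNat
lemma pvKeyStep (N : Int) (k : Nat)
    (IH : ∀ (start mask : Int),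
      (pvCombos k (PySem.List.pyRange start N 1)).map
        (List.foldl (fun x num => x + ((1 : Int) <<< num.toNat)) mask)
      = pvGo N k start mask) :
    ∀ (n : Nat) (start mask : Int), (N - start).toNat ≤ n →
      (pvCombos (k + 1) (PySem.List.pyRange start N 1)).map
        (List.foldl (fun x num => x + ((1 : Int) <<< num.toNat)) mask)
      = pvGo N (k + 1) start mask := by
  intro n
  induction n with
  | zero =>
    intro start mask h
    have hsN : N ≤ start := by omega
    rw [PySem.List.pyRange_one_eq_nil hsN]
    simp only [pvGo, PySem.List.pyRange_one_eq_nil (show N - (↑k + 1) + 1 ≤ start by omega),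
      List.flatMap_nil]
    rfl
  | succ n ihn =>
    intro start mask h
    by_cases hlt : start < N
    · rw [PySem.List.pyRange_one_cons hlt]
      simp only [pvCombos, List.map_append, List.map_map]
      have hcomp :
          (List.foldl (fun x num => x + ((1 : Int) <<< num.toNat)) mask) ∘ (start :: ·)
          = List.foldl (fun x num => x + ((1 : Int) <<< num.toNat))
              (mask + ((1 : Int) <<< (start.toNat : Int))) := by
        funext l; simp only [Function.comp_apply, List.foldl_cons]
      rw [hcomp, IH (start + 1) (mask + ((1 : Int) <<< (start.toNat : Int))),
        ihn (start + 1) mask (by omega)]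
      by_cases hsk : start < N - (↑k + 1) + 1
      · conv_rhs => rw [pvGo_succ, PySem.List.pyRange_one_cons hsk, List.flatMap_cons, ← pvGo_succ]
        have hb : (1 : Int) <<< (start.toNat : Int) = (1 : Int) <<< start.toNat := by
          rw [Int.one_shiftLeft]; norm_cast; simp [Nat.shiftLeft_eq]
        rw [hb]
      · -- start is too close to N to fit k+1 more bits: both sides are empty
        have h1 : pvGo N (k + 1) start mask = [] := by
          rw [pvGo_succ, PySem.List.pyRange_one_eq_nil (by omega), List.flatMap_nil]
        have h2 : pvGo N (k + 1) (start + 1) mask = [] := by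
          rw [pvGo_succ, PySem.List.pyRange_one_eq_nil (by omega), List.flatMap_nil]
        have h3 : pvGo N k (start + 1) (mask + ((1 : Int) <<< (start.toNat : Int))) = [] := by
          rw [← IH, pvCombos_nil_of_short _ k
            (by rw [PySem.List.length_pyRange_one]; omega), List.map_nil]
        rw [h1, h2, h3]
        rfl
    · have hsN : N ≤ start := by omega
      rw [PySem.List.pyRange_one_eq_nil hsN]
      simp only [pvGo, PySem.List.pyRange_one_eq_nil (show N - (↑k + 1) + 1 ≤ start by omega),
        List.flatMap_nil]
      rfl

-- main bridge: mapping the mask fold over pvCombos of a tail range equals pvGo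
lemma pvKey (N : Int) : ∀ (k : Nat) (start mask : Int),
    (pvCombos k (PySem.List.pyRange start N 1)).map
      (List.foldl (fun x num => x + ((1 : Int) <<< num.toNat)) mask)
    = pvGo N k start mask := by
  intro k
  induction k with
  | zero => intro start mask; simp [pvCombos, pvGo]
  | succ k ih => intro start mask; exact pvKeyStep N k ih (N - start).toNat start mask le_rfl

-- stack-machine invariant: pvLoop flushes acc then the contribution of each stack entry in order
lemma pvLoop_eq (N : Int) : ∀ (stack : List (Int × Nat × Int)) (acc : List Int),
    pvLoop N stack acc
    = acc.reverse ++ (stack.map (fun e => pvGo N e.2.1 e.1 e.2.2)).flatten := by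
  intro stack acc
  induction stack, acc using pvLoop.induct N with
  | case1 acc => simp [pvLoop]
  | case2 start mask rest acc ih =>
    rw [pvLoop, ih]
    simp [pvGo]
  | case3 start rem mask rest acc ih =>
    rw [pvLoop, ih]
    simp [pvGo_succ, List.flatMap_def, List.map_map, Function.comp_def]

-- ===== VERDICT (by name: the statement is the Claim_ definition above) =====
theorem subtours_spec : Claim_equal_subtours := by
  intro r N _ _
  unfold Spec_subtours subtours subtours_alt
  rw [pvLoop_eq]
  simpa using pvKey N r.toNat 0 0
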